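-- pv_equiv track=rewrite | github.com/AlvieSpurlock/MathCore | MathCore/MathTypes/Advanced/Combinatorics.py | MultinomialTerm
-- ===== SOURCE A (Python) =====
-- import math  # Import math for factorial, comb, sqrt, log, floor, ceil
--
-- def MultinomialCoefficient(n, groups):
--     if any(g < 0 for g in groups):                             # Guard against negative group sizes
--         return 0                                                # Return 0 safely
--     if sum(groups) != n:                                        # Group sizes must sum to total
--         return 0                                                # Return 0 safely — inconsistent inputs
--     denominator = 1                                             # Initialize denominator accumulator
--     for g in groups:                                            # Multiply factorial of each group size
--         denominator *= math.factorial(g)                        # Accumulate denominator product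
--     return math.factorial(n) // denominator                     # Divide n! by product → complete multinomial coefficient
--
-- def MultinomialTerm(n, powers, values):
--     if sum(powers) != n:                                        # Guard — powers must sum to n
--         return 0                                                # Return 0 safely
--     if len(powers) != len(values):                              # Guard against mismatched lists
--         return 0                                                # Return 0 safely
--     coeff  = MultinomialCoefficient(n, powers)                  # Compute the multinomial coefficient
--     product = 1                                                  # Initialize value product accumulator
--     for v, p in zip(values, powers):                            # Multiply each value raised to its power
--         product *= v ** p                                       # Accumulate variable^power product
--     return coeff * product                                      # Multiply coefficient by value product → complete term
-- ===== SOURCE B (Python) =====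
-- import math
--
-- def MultinomialTerm(n, powers, values):
--     if sum(powers) != n or len(powers) != len(values):
--         return 0
--     coeff, rem = 1, n
--     for p in powers:
--         coeff *= math.comb(rem, p)   # running product of binomials over shrinking remainder
--         rem -= p
--     product = 1
--     for v, p in zip(values, powers):
--         product *= v ** p
--     return coeff * product
-- ===== Notes on version B (the rewrite author's own statement) =====
-- stated objective: alternative
-- what changed: B inlines the coefficient helper and computes the multinomial coefficient as a running product of binomial coefficients math.comb(rem,p) over a shrinking remainder instead of dividing n! by a product of factorials.
-- outside the precondition, e.g. on MultinomialTerm(1, [-1, 2], [2, 3]): A returns 0.0, B raises ValueError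
import Mathlib
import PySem

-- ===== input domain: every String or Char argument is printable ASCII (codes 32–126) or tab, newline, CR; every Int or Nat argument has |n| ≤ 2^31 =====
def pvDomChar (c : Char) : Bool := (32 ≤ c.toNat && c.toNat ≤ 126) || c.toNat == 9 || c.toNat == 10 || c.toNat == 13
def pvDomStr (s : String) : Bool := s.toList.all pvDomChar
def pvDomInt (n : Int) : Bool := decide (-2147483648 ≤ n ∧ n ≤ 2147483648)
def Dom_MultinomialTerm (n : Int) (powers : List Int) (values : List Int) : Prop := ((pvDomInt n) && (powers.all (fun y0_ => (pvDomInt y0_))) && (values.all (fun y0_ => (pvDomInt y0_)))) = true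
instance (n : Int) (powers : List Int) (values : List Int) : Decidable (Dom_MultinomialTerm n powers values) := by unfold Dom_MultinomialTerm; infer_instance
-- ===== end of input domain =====

-- B inlines the helper and builds the coefficient as a running product of binomials
-- over a shrinking remainder instead of dividing n! by a product of factorials (alternative, not faster).

-- ===== PORT A =====
def MultinomialCoefficient (n : Int) (groups : List Int) : Int :=
  if groups.any (fun g => decide (g < 0)) then 0
  else if groups.sum ≠ n then 0
  else
    let denominator := groups.foldl (fun d g => d * (Nat.factorial g.toNat : Int)) 1
    PySem.Int.floordiv (Nat.factorial n.toNat : Int) denominator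

def MultinomialTerm (n : Int) (powers : List Int) (values : List Int) : Int :=
  if powers.sum ≠ n then 0
  else if powers.length ≠ values.length then 0
  else
    let coeff := MultinomialCoefficient n powers
    let product := (values.zip powers).foldl (fun acc vp => acc * vp.1 ^ vp.2.toNat) 1
    coeff * product

-- ===== PORT B =====
def MultinomialTerm_alt (n : Int) (powers : List Int) (values : List Int) : Int :=
  if powers.sum ≠ n ∨ powers.length ≠ values.length then 0
  else
    let cr := powers.foldl
      (fun (cr : Int × Int) p => (cr.1 * (Nat.choose cr.2.toNat p.toNat : Int), cr.2 - p)) (1, n)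
    let product := (values.zip powers).foldl (fun acc vp => acc * vp.1 ^ vp.2.toNat) 1
    cr.1 * product

-- ===== PRECONDITION & SPEC =====
-- Pre_ excludes inputs that pass both guards yet contain a negative power: there A
-- returns the float 0.0 (not an int) or raises ZeroDivisionError on 0 ** negative.
def Pre_MultinomialTerm (n : Int) (powers : List Int) (values : List Int) : Prop :=
  (powers.sum = n ∧ powers.length = values.length) → ∀ p ∈ powers, 0 ≤ p
instance (n : Int) (powers : List Int) (values : List Int) : Decidable (Pre_MultinomialTerm n powers values) := by unfold Pre_MultinomialTerm; infer_instance

def pvWitness_MultinomialTerm : Int × List Int × List Int := (3, [1, 2], [2, 3])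

def Spec_MultinomialTerm (n : Int) (powers : List Int) (values : List Int) (out : Int) : Prop := out = MultinomialTerm_alt n powers values
instance (n : Int) (powers : List Int) (values : List Int) (out : Int) : Decidable (Spec_MultinomialTerm n powers values out) := by unfold Spec_MultinomialTerm; infer_instance

-- ===== CLAIM (what is proved, stated in full; the proofs are below) =====
def Claim_equal_MultinomialTerm : Prop := ∀ (n : Int) (powers : List Int) (values : List Int), Dom_MultinomialTerm n powers values → Pre_MultinomialTerm n powers values → Spec_MultinomialTerm n powers values (MultinomialTerm n powers values)

-- ===== LEMMAS AND PROOFS =====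

/-- The stepwise product of binomial coefficients, in Nat. -/
def chProd : Nat → List Nat → Nat
  | _, [] => 1
  | r, q :: t => Nat.choose r q * chProd (r - q) t

/-- Cast a Nat list to an Int list (helper for the proofs). -/
def mapCast : List Nat → List Int
  | [] => []
  | q :: t => (q : Int) :: mapCast t

theorem toNat_sub_natCast (i : Int) (q : Nat) : (i - (q : Int)).toNat = i.toNat - q := by
  omega

theorem mapCast_sum (qs : List Nat) : (mapCast qs).sum = (qs.sum : Int) := by
  induction qs with
  | nil => simp [mapCast]
  | cons q t ih => simp [mapCast, ih]

/-- B's fold computes chProd. -/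
theorem B_fold (qs : List Nat) (c i : Int) :
    (mapCast qs).foldl
      (fun (cr : Int × Int) p => (cr.1 * (Nat.choose cr.2.toNat p.toNat : Int), cr.2 - p)) (c, i)
    = (c * (chProd i.toNat qs : Int), i - (qs.sum : Int)) := by
  induction qs generalizing c i with
  | nil => simp [mapCast, chProd]
  | cons q t ih =>
    rw [mapCast, List.foldl_cons, ih, Prod.mk.injEq]
    simp only [Int.toNat_natCast, toNat_sub_natCast, chProd]
    constructor
    · push_cast; ring
    · push_cast [List.sum_cons]; ring

/-- A's denominator fold computes the product of factorials. -/
theorem A_fold (qs : List Nat) (d : Int) :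
    (mapCast qs).foldl (fun d g => d * (Nat.factorial g.toNat : Int)) d
    = d * ((qs.map Nat.factorial).prod : Int) := by
  induction qs generalizing d with
  | nil => simp [mapCast]
  | cons q t ih =>
    rw [mapCast, List.foldl_cons, ih, List.map_cons, List.prod_cons]
    simp only [Int.toNat_natCast]
    push_cast; ring

/-- The key identity: the stepwise binomial product times the factorial product is s!. -/
theorem chProd_mul_prod (qs : List Nat) :
    chProd qs.sum qs * (qs.map Nat.factorial).prod = (qs.sum).factorial := by
  induction qs with
  | nil => simp [chProd]
  | cons q t ih =>
    have hle : q ≤ q + t.sum := Nat.le_add_right _ _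
    have hsub : q + t.sum - q = t.sum := by omega
    calc chProd (q :: t).sum (q :: t) * ((q :: t).map Nat.factorial).prod
        = Nat.choose (q + t.sum) q * Nat.factorial q *
            (chProd t.sum t * (t.map Nat.factorial).prod) := by
          simp [chProd, List.sum_cons, hsub]; ring
      _ = Nat.choose (q + t.sum) q * Nat.factorial q * Nat.factorial t.sum := by rw [ih]
      _ = Nat.factorial (q + t.sum) := by
          have := Nat.choose_mul_factorial_mul_factorial hle
          rw [hsub] at this; exact this
      _ = Nat.factorial (q :: t).sum := by simp [List.sum_cons]

theorem powers_eq_mapCast (powers : List Int) (h : ∀ p ∈ powers, 0 ≤ p) :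
    powers = mapCast (powers.map Int.toNat) := by
  induction powers with
  | nil => rfl
  | cons p t ih =>
    rw [List.map_cons, mapCast]
    congr 1
    · exact (Int.toNat_of_nonneg (h p (List.mem_cons_self))).symm
    · exact ih (fun x hx => h x (List.mem_cons_of_mem _ hx))

theorem coeff_eq (n : Int) (powers : List Int) (hpre : ∀ p ∈ powers, 0 ≤ p)
    (hsum : powers.sum = n) :
    MultinomialCoefficient n powers
      = (powers.foldl
          (fun (cr : Int × Int) p => (cr.1 * (Nat.choose cr.2.toNat p.toNat : Int), cr.2 - p))
          (1, n)).1 := by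
  set qs := powers.map Int.toNat with hqs
  have hrep : powers = mapCast qs := powers_eq_mapCast powers hpre
  have hn : n = (qs.sum : Int) := by rw [← hsum, hrep, mapCast_sum]
  have hneg : powers.any (fun g => decide (g < 0)) = false := by
    simp only [List.any_eq_false, decide_eq_true_eq, not_lt]
    exact hpre
  have hprodpos : 0 < (qs.map Nat.factorial).prod :=
    List.prod_pos (by intro x hx; rcases List.mem_map.mp hx with ⟨q, _, rfl⟩
                      exact Nat.factorial_pos q)
  rw [MultinomialCoefficient]
  rw [hneg, if_neg (by simp), if_neg (by simp [hsum])]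
  conv_rhs => rw [hrep]
  rw [B_fold]
  conv_lhs => rw [hrep, A_fold qs (1 : Int)]
  simp only [one_mul, hn, Int.toNat_natCast]
  rw [PySem.Int.floordiv_natCast]
  congr 1
  rw [← chProd_mul_prod qs]
  exact Nat.mul_div_cancel _ hprodpos

-- ===== VERDICT (by name: the statement is the Claim_ definition above) =====
theorem MultinomialTerm_spec : Claim_equal_MultinomialTerm := by
  intro n powers values _ hpre
  unfold Spec_MultinomialTerm MultinomialTerm MultinomialTerm_alt
  by_cases hs : powers.sum = n
  · by_cases hl : powers.length = values.length
    · rw [if_neg (by simp [hs]), if_neg (by simp [hl]), if_neg (by simp [hs, hl])]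
      rw [coeff_eq n powers (hpre ⟨hs, hl⟩) hs]
    · simp [hs, hl]
  · simp [hs]
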